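-- pv_equiv track=rewrite | github.com/vcm2114/Project2A | concepts.py | common_attributes
-- ===== SOURCE A (Python) =====
-- def common_attributes(M, objets):
--
--     '''
--     Input: - M: context matrix
--            - objets: a set of objects
--     Output: set of common attributes
--     '''
--
--     nobjects = len(objets)
--     nattributes = len(M[0])
--     att = range(nattributes)
--     res = [1]*nattributes
--
--     for j in att:
--         i = 0
--         while (i < nobjects) and (res[j]==1):
--             res[j] = (res[j] and M[objets[i]][j])
--             i += 1
--
--     return [e for e in att if (res[e]==1)]
-- ===== SOURCE B (Python) =====
-- def common_attributes(M, objets):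
--     nattr = len(M[0])
--     cnt = [0] * nattr
--     for o in objets:
--         row = M[o]
--         cnt = [c + 1 if row[j] == 1 else c for j, c in enumerate(cnt)]
--     n = len(objets)
--     return [j for j in range(nattr) if cnt[j] == n]
-- ===== Notes on version B (the rewrite author's own statement) =====
-- stated objective: alternative
-- what changed: Replaces A's per-attribute while-loop over a mutable 0/1 marker array by a single aggregation pass that builds a per-attribute counter of how many selected rows have value 1, then keeps the attribute indices whose count equals the number of selected objects.
-- outside the precondition, e.g. on common_attributes([[0], []], [0, 1]): A returns [], B raises IndexError
import Mathlib
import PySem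

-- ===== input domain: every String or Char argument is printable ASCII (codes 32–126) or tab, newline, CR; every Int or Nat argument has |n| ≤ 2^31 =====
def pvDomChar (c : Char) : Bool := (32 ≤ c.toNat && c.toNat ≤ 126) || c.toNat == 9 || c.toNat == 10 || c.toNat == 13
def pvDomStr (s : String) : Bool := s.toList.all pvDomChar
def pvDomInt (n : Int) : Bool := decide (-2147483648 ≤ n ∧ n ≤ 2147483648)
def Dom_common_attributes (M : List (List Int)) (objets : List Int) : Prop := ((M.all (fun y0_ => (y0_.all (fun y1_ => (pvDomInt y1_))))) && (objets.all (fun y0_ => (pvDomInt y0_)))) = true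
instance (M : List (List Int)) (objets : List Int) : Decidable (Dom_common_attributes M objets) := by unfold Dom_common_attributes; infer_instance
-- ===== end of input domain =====

-- B replaces A's per-attribute while-loop over a 0/1 marker array by one aggregation pass
-- building a per-attribute counter of rows with value 1, keeping indices whose count equals
-- the number of selected objects. (objective: alternative)

-- ===== PORT A =====
-- the inner 'while (i < nobjects) and (res[j]==1)' loop of A, recursing on the remaining objects
def pvAWhile (M : List (List Int)) (rest : List Int) (j : Int) (r : Int) : Int :=
  match rest with
  | [] => r
  | o :: t =>
      if r == 1 then
        -- res[j] = (res[j] and M[objets[i]][j]); Python 'and' returns r when r is falsy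
        pvAWhile M t j (if r == 0 then r else PySem.List.pyGetD (PySem.List.pyGetD M o []) j 0)
      else r

def common_attributes (M : List (List Int)) (objets : List Int) : List Int :=
  -- nattributes = len(M[0]); att = range(nattributes); filter att by the per-column while loop
  (PySem.List.pyRange 0 ((PySem.List.pyGetD M 0 []).length) 1).filter
    (fun j => pvAWhile M objets j 1 == 1)

-- ===== PORT B =====
-- one step of B's aggregation: cnt = [c + 1 if row[j] == 1 else c for j, c in enumerate(cnt)]
def pvBStep (row cnt : List Int) : List Int :=
  (PySem.List.enumerate cnt).map
    (fun p => if PySem.List.pyGetD row p.1 0 == 1 then p.2 + 1 else p.2)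

def common_attributes_alt (M : List (List Int)) (objets : List Int) : List Int :=
  let nattr := (PySem.List.pyGetD M 0 []).length
  -- cnt = [0]*nattr; for o in objets: cnt = step
  let cnt := objets.foldl (fun cnt o => pvBStep (PySem.List.pyGetD M o []) cnt)
    (List.replicate nattr 0)
  -- [j for j in range(nattr) if cnt[j] == n]
  (PySem.List.pyRange 0 nattr 1).filter
    (fun j => PySem.List.pyGetD cnt j 0 == (objets.length : Int))

-- ===== PRECONDITION & SPEC =====
-- Pre_ excludes inputs where M is empty (A raises IndexError on M[0]), an object index is out of
-- range, or a referenced row is shorter than the first row: on those A in general raises IndexError,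
-- though on a few of them A's column-wise short-circuit still returns (see the cited example).
def Pre_common_attributes (M : List (List Int)) (objets : List Int) : Prop :=
  M ≠ [] ∧ ∀ o ∈ objets, PySem.Raise.InRange M.length o ∧
    (PySem.List.pyGetD M 0 []).length ≤ (PySem.List.pyGetD M o []).length
instance (M : List (List Int)) (objets : List Int) : Decidable (Pre_common_attributes M objets) := by
  unfold Pre_common_attributes; infer_instance

def pvWitness_common_attributes : List (List Int) × List Int := ([[1, 0], [1, 1]], [0, 1])

def Spec_common_attributes (M : List (List Int)) (objets : List Int) (out : List Int) : Prop := out = common_attributes_alt M objets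
instance (M : List (List Int)) (objets : List Int) (out : List Int) : Decidable (Spec_common_attributes M objets out) := by unfold Spec_common_attributes; infer_instance

-- ===== CLAIM =====
def Claim_equal_common_attributes : Prop := ∀ (M : List (List Int)) (objets : List Int), Dom_common_attributes M objets → Pre_common_attributes M objets → Spec_common_attributes M objets (common_attributes M objets)

-- ===== LEMMAS AND PROOFS =====

-- A's while loop is stuck once the marker differs from 1
theorem pvAWhile_of_ne_one (M : List (List Int)) (rest : List Int) (j r : Int)
    (h : ¬ r == 1) : pvAWhile M rest j r = r := by
  cases rest with
  | nil => rfl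
  | cons o t => simp [pvAWhile, h]

-- A's marker survives iff every selected row has a 1 in column j
theorem pvAWhile_eq_all (M : List (List Int)) (rest : List Int) (j : Int) :
    (pvAWhile M rest j 1 == 1) =
      rest.all (fun o => PySem.List.pyGetD (PySem.List.pyGetD M o []) j 0 == 1) := by
  induction rest with
  | nil => rfl
  | cons o t ih =>
      by_cases h : PySem.List.pyGetD (PySem.List.pyGetD M o []) j 0 == 1
      · have hv : PySem.List.pyGetD (PySem.List.pyGetD M o []) j 0 = 1 := beq_iff_eq.mp h
        simp [pvAWhile, hv, ih]
      · rw [pvAWhile]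
        norm_num
        rw [pvAWhile_of_ne_one M t j _ h]
        simp [h]

theorem pvBStep_length (row cnt : List Int) : (pvBStep row cnt).length = cnt.length := by
  simp [pvBStep]

theorem pvBStep_get (row cnt : List Int) (k : Nat) (hk : k < cnt.length) :
    PySem.List.pyGetD (pvBStep row cnt) (k : Int) 0 =
      PySem.List.pyGetD cnt (k : Int) 0 +
        (if PySem.List.pyGetD row (k : Int) 0 == 1 then 1 else 0) := by
  have hk' : k < (pvBStep row cnt).length := by rw [pvBStep_length]; exact hk
  rw [PySem.List.pyGetD_ofNat _ _ _ hk', PySem.List.pyGetD_ofNat _ _ _ hk]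
  simp [pvBStep, PySem.List.getElem_enumerate]
  split_ifs <;> simp

-- the counter at index k is its initial value plus the number of rows with a 1 in column k
theorem pvBFold_get (M : List (List Int)) (objets : List Int) (cnt : List Int)
    (k : Nat) (hk : k < cnt.length) :
    PySem.List.pyGetD
      (objets.foldl (fun cnt o => pvBStep (PySem.List.pyGetD M o []) cnt) cnt) (k : Int) 0 =
      PySem.List.pyGetD cnt (k : Int) 0 +
        (objets.countP
          (fun o => PySem.List.pyGetD (PySem.List.pyGetD M o []) (k : Int) 0 == 1) : Int) := by
  induction objets generalizing cnt with
  | nil => simp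
  | cons o t ih =>
      rw [List.foldl_cons, ih _ (by rw [pvBStep_length]; exact hk),
        pvBStep_get _ _ _ hk, List.countP_cons]
      split_ifs with h <;> simp <;> ring

theorem common_attributes_eq (M : List (List Int)) (objets : List Int) :
    common_attributes M objets = common_attributes_alt M objets := by
  unfold common_attributes common_attributes_alt
  apply List.filter_congr
  intro j hj
  set nattr := (PySem.List.pyGetD M 0 []).length with hn
  have hjr := PySem.List.mem_pyRange_one.mp hj
  obtain ⟨k, hk1, hk2⟩ : ∃ k : Nat, (k : Int) = j ∧ k < nattr := by
    refine ⟨j.toNat, ?_, ?_⟩ <;> omega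
  subst hk1
  rw [pvAWhile_eq_all,
    pvBFold_get M objets (List.replicate nattr 0) k (by simpa using hk2)]
  have hrep : ((List.replicate nattr (0 : Int)).getD k 0) = 0 := by
    simp [List.getD_eq_getElem?_getD]
  simp only [PySem.List.pyGetD_natCast, hrep, zero_add]
  rcases Bool.eq_false_or_eq_true
      (objets.all (fun o => (PySem.List.pyGetD M o []).getD k 0 == 1))
    with ha | ha
  · have heq := (List.countP_eq_length
      (p := fun o => (PySem.List.pyGetD M o []).getD k 0 == 1)
      (l := objets)).mpr (fun o ho => List.all_eq_true.mp ha o ho)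
    rw [ha, heq]
    simp
  · rw [ha]
    have hlt : objets.countP
        (fun o => (PySem.List.pyGetD M o []).getD k 0 == 1)
        < objets.length := by
      rcases (List.all_eq_false).mp ha with ⟨o, ho, hp⟩
      exact lt_of_le_of_ne List.countP_le_length
        (fun hc => hp (List.countP_eq_length.mp hc o ho))
    symm
    rw [beq_eq_false_iff_ne]
    exact_mod_cast Nat.ne_of_lt hlt

-- ===== VERDICT =====
theorem common_attributes_spec : Claim_equal_common_attributes := by
  intro M objets _ _
  unfold Spec_common_attributes
  exact common_attributes_eq M objets
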